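-- pv_equiv track=rewrite | github.com/dgsim126/codingTest | lv1/0913/가장 많이 받은 선물.py | solution
-- ===== SOURCE A (Python) =====
-- def solution(friends, gifts):
--     answer = 0
--     dic = {}    # 선물을 주고 받을 수 있는 모든 케이스를 정리
--     arr = []    # friends 각 index 다음 달 선물 개수
--     dic2 = {}   # 선물 지수 계산
--     for i in range(len(friends)):   # friends 각 친구들이 받는 선물들 개수를 +1 식으로 계산하기 위해 0으로 초기화
--         arr.append(0)
--         dic2[friends[i]] = 0    # 선물 지수도 함께 초기화
--     for i in friends:
--         for j in friends:
--             if i  == j: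
--                 continue
--             else:
--                 dic[i + ' ' + j] = 0
--     for i in gifts:
--         dic[i] = dic[i] + 1
--         dic2[i.split()[0]] = dic2[i.split()[0]] + 1
--         dic2[i.split()[1]] = dic2[i.split()[1]] - 1
--     count = 0
--     for i in range(len(friends)):
--         for j in range(i+1, len(friends)):
--             if dic[friends[i] + ' ' + friends[j]] < dic[friends[j] + ' ' + friends[i]]:
--                 arr[j] += 1
--             elif dic[friends[i] + ' ' + friends[j]] > dic[friends[j] + ' ' + friends[i]]:
--                 arr[i] += 1
--             else:
--                 if dic2[friends[i]] > dic2[friends[j]]: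
--                     arr[i] += 1
--                 elif dic2[friends[i]] < dic2[friends[j]]:
--                     arr[j] += 1
--     answer = max(arr)
--     return answer
-- ===== SOURCE B (Python) =====
-- def solution(friends, gifts):
--     # gift index per friend, and a counter of the gift strings "giver receiver"
--     idx = {f: 0 for f in friends}
--     cnt = {}
--     for g in gifts:
--         cnt[g] = cnt.get(g, 0) + 1
--         t = g.split()
--         idx[t[0]] += 1
--         idx[t[1]] -= 1
--     # baseline score: rank of a friend's gift index = number of friends with a
--     # strictly smaller index (computed by one sort, not by pairwise comparison)
--     vals = sorted(idx[f] for f in friends)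
--     rank = {}
--     for r, v in enumerate(vals):
--         if v not in rank:
--             rank[v] = r
--     score = {f: rank[idx[f]] for f in friends}
--     # fix up only the pairs whose direct gift counts are unequal (each such
--     # unordered pair is visited exactly once via its canonical key in cnt)
--     for g in cnt:
--         t = g.split()
--         a, b = t[0], t[1]
--         if a == b or (b < a and b + ' ' + a in cnt):
--             continue
--         ca = cnt[g]
--         cb = cnt.get(b + ' ' + a, 0)
--         if ca == cb:
--             continue
--         w, l = (a, b) if ca > cb else (b, a)
--         if idx[w] <= idx[l]:
--             score[w] += 1
--             if idx[w] < idx[l]: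
--                 score[l] -= 1
--     return max(score.values())
-- ===== Notes on version B (the rewrite author's own statement) =====
-- stated objective: faster
-- what changed: Replaces A's quadratic all-pairs comparison loop by a sort-based ranking: each friend's baseline score is its rank among the sorted gift indices (number of friends with a strictly smaller index), and only the unordered pairs whose direct gift counts are unequal (at most one per distinct gift string) are visited once to correct the winner/loser, so no friend-vs-friend double loop remains.
-- outside the precondition, e.g. on solution(['', 'a', 'b'], ['a b']): A returns 2, B returns 2; on solution(['b', 'a', 'b c'], ['b b c']): A returns 1, B returns 0
import Mathlib
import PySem

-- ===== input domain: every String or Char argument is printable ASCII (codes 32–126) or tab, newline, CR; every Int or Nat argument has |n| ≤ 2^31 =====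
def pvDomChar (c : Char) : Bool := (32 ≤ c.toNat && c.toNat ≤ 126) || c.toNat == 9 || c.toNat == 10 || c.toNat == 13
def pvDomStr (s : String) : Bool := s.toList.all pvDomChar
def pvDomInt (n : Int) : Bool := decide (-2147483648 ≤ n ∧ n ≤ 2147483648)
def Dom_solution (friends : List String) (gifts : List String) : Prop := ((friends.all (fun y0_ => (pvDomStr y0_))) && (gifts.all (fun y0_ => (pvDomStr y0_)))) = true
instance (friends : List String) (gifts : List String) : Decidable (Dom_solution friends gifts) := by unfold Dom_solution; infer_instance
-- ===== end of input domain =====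

-- B replaces A's quadratic all-pairs comparison loop by a sort-based rank (friends with a strictly
-- smaller gift index) corrected once per unordered pair whose direct gift counts are unequal
-- (O(n log n + m) work instead of A's O(n^2 + m) pair scan).

-- ===== PORT A =====
-- for i in range(len(friends)): arr.append(0); dic2[friends[i]] = 0
def pvInitA (fr : List String) : List Int × PySem.Dict String Int :=
  (PySem.List.pyRange 0 (fr.length : Int) 1).foldl
    (fun (st : List Int × PySem.Dict String Int) i =>
      (st.1 ++ [(0 : Int)], st.2.insert (PySem.List.pyGetD fr i "") 0))
    ([], PySem.Dict.empty)

-- for i in friends: for j in friends: if i == j: continue; else: dic[i+' '+j] = 0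
def pvPairDict (fr : List String) : PySem.Dict String Int :=
  fr.foldl
    (fun (d : PySem.Dict String Int) i =>
      fr.foldl (fun d j => if i == j then d else d.insert (i ++ " " ++ j) 0) d)
    PySem.Dict.empty

-- for i in gifts: dic[i] = dic[i] + 1; dic2[i.split()[0]] += 1; dic2[i.split()[1]] -= 1
-- (dic[i] / dic2[...] raise KeyError outside Pre_; getD is exact on Pre_)
def pvGiftStepA (st : PySem.Dict String Int × PySem.Dict String Int) (g : String) :
    PySem.Dict String Int × PySem.Dict String Int :=
  (st.1.insert g (st.1.getD g 0 + 1),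
   let t0 := PySem.List.pyGetD (PySem.Str.split₀ g) 0 ""
   let t1 := PySem.List.pyGetD (PySem.Str.split₀ g) 1 ""
   let d2 := st.2.insert t0 (st.2.getD t0 0 + 1)
   d2.insert t1 (d2.getD t1 0 - 1))

-- the triangular comparison loop mutating arr
def pvCmpLoopA (dic dic2 : PySem.Dict String Int) (fr : List String) (arr : List Int) : List Int :=
  (PySem.List.pyRange 0 (fr.length : Int) 1).foldl
    (fun (arr : List Int) i =>
      (PySem.List.pyRange (i + 1) (fr.length : Int) 1).foldl
        (fun (arr : List Int) j =>
          let fi := PySem.List.pyGetD fr i ""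
          let fj := PySem.List.pyGetD fr j ""
          if dic.getD (fi ++ " " ++ fj) 0 < dic.getD (fj ++ " " ++ fi) 0 then
            PySem.List.pySetD arr j (PySem.List.pyGetD arr j 0 + 1)
          else if dic.getD (fi ++ " " ++ fj) 0 > dic.getD (fj ++ " " ++ fi) 0 then
            PySem.List.pySetD arr i (PySem.List.pyGetD arr i 0 + 1)
          else if dic2.getD fi 0 > dic2.getD fj 0 then
            PySem.List.pySetD arr i (PySem.List.pyGetD arr i 0 + 1)
          else if dic2.getD fi 0 < dic2.getD fj 0 then
            PySem.List.pySetD arr j (PySem.List.pyGetD arr j 0 + 1)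
          else arr)
        arr)
    arr

def solution (friends : List String) (gifts : List String) : Int :=
  let st0 := pvInitA friends
  let dic0 := pvPairDict friends
  let st1 := gifts.foldl pvGiftStepA (dic0, st0.2)
  let arr := pvCmpLoopA st1.1 st1.2 friends st0.1
  (PySem.List.max? arr (fun x => x)).getD 0    -- answer = max(arr); empty arr excluded by Pre_

-- ===== PORT B =====
-- for g in gifts: cnt[g] = cnt.get(g, 0) + 1; t = g.split(); idx[t[0]] += 1; idx[t[1]] -= 1
-- (idx[...] raises KeyError outside Pre_; getD is exact on Pre_)
def pvGiftStepB (st : PySem.Dict String Int × PySem.Dict String Int) (g : String) :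
    PySem.Dict String Int × PySem.Dict String Int :=
  (st.1.insert g (st.1.getD g 0 + 1),
   let t := PySem.Str.split₀ g
   let d := st.2.insert (PySem.List.pyGetD t 0 "")
     (st.2.getD (PySem.List.pyGetD t 0 "") 0 + 1)
   d.insert (PySem.List.pyGetD t 1 "") (d.getD (PySem.List.pyGetD t 1 "") 0 - 1))

-- for r, v in enumerate(vals): if v not in rank: rank[v] = r
def pvRankFold (vals : List Int) : PySem.Dict Int Int :=
  (PySem.List.enumerate vals 0).foldl
    (fun (rank : PySem.Dict Int Int) rv =>
      if rank.contains rv.2 then rank else rank.insert rv.2 rv.1)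
    PySem.Dict.empty

-- one iteration of the fix-up loop 'for g in cnt: …' of B
-- (cnt[g] never raises, g ranges over cnt's keys; getD is exact there)
def pvAdjStep (cnt idx : PySem.Dict String Int) (score : PySem.Dict String Int) (g : String) :
    PySem.Dict String Int :=
  let t := PySem.Str.split₀ g
  let a := PySem.List.pyGetD t 0 ""
  let b := PySem.List.pyGetD t 1 ""
  if a == b || (decide (b < a) && cnt.contains (b ++ " " ++ a)) then score
  else
    let ca := cnt.getD g 0
    let cb := cnt.getD (b ++ " " ++ a) 0
    if ca == cb then score
    else
      let wl := if ca > cb then (a, b) else (b, a)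
      if idx.getD wl.1 0 ≤ idx.getD wl.2 0 then
        let score1 := score.insert wl.1 (score.getD wl.1 0 + 1)
        if idx.getD wl.1 0 < idx.getD wl.2 0 then
          score1.insert wl.2 (score1.getD wl.2 0 - 1)
        else score1
      else score

def solution_alt (friends : List String) (gifts : List String) : Int :=
  let idx0 := friends.foldl (fun (d : PySem.Dict String Int) f => d.insert f 0) PySem.Dict.empty
  let st := gifts.foldl pvGiftStepB (PySem.Dict.empty, idx0)
  let vals := PySem.List.sorted (friends.map (fun f => st.2.getD f 0)) (fun x => x)
  let rank := pvRankFold vals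
  let score0 := friends.foldl
    (fun (d : PySem.Dict String Int) f => d.insert f (rank.getD (st.2.getD f 0) 0))
    PySem.Dict.empty
  let score := st.1.keys.foldl (pvAdjStep st.1 st.2) score0
  (PySem.List.max? score.values (fun x => x)).getD 0    -- max(score.values()); nonempty on Pre_

-- ===== PRECONDITION & SPEC =====
-- Pre_ excludes the inputs on which A raises — empty friends (ValueError on max), duplicate names
-- (KeyError in the pairwise loop), gifts that are not 'x y' for two distinct friends (KeyError /
-- IndexError) — and, a stated NARROWING when gifts is nonempty, friend names that are empty or
-- contain whitespace: A can still return there, but its space-joined dict keys are then ambiguous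
-- and its value an accident of the key collisions (see cites).
def Pre_solution (friends : List String) (gifts : List String) : Prop :=
  friends ≠ [] ∧ friends.Nodup ∧
  (gifts = [] ∨
    ∀ f ∈ friends, f.toList ≠ [] ∧ f.toList.all (fun c => !PySem.Chars.isspace c) = true) ∧
  ∀ g ∈ gifts, ∃ x ∈ friends, ∃ y ∈ friends, x ≠ y ∧ g.toList = x.toList ++ ' ' :: y.toList

instance (friends : List String) (gifts : List String) : Decidable (Pre_solution friends gifts) := by
  unfold Pre_solution; infer_instance

def pvWitness_solution : List String × List String := (["a", "b"], ["a b"])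

def Spec_solution (friends : List String) (gifts : List String) (out : Int) : Prop :=
  out = solution_alt friends gifts
instance (friends : List String) (gifts : List String) (out : Int) :
    Decidable (Spec_solution friends gifts out) := by
  unfold Spec_solution; infer_instance

-- ===== CLAIM (what is proved, stated in full; the proofs are below) =====
def Claim_equal_solution : Prop := ∀ (friends : List String) (gifts : List String), Dom_solution friends gifts → Pre_solution friends gifts → Spec_solution friends gifts (solution friends gifts)

-- ===== LEMMAS AND PROOFS =====

-- shared abbreviations: the final gift counter / gift-index values, as functions
def pvC (gs : List String) (s : String) : Int := (gs.count s : Int)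

def pvD2fun (d : PySem.Dict String Int) (g : String) : PySem.Dict String Int :=
  (d.insert (PySem.List.pyGetD (PySem.Str.split₀ g) 0 "")
      (d.getD (PySem.List.pyGetD (PySem.Str.split₀ g) 0 "") 0 + 1)).insert
    (PySem.List.pyGetD (PySem.Str.split₀ g) 1 "")
    ((d.insert (PySem.List.pyGetD (PySem.Str.split₀ g) 0 "")
        (d.getD (PySem.List.pyGetD (PySem.Str.split₀ g) 0 "") 0 + 1)).getD
      (PySem.List.pyGetD (PySem.Str.split₀ g) 1 "") 0 - 1)

def pvIdxD (fr gs : List String) : PySem.Dict String Int :=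
  gs.foldl pvD2fun (fr.foldl (fun (d : PySem.Dict String Int) f => d.insert f 0) PySem.Dict.empty)

def pvIdxF (fr gs : List String) (x : String) : Int := (pvIdxD fr gs).getD x 0

-- the win test shared by both characterisations
def pvw (c d2 : String → Int) (f o : String) : Bool :=
  decide (c (o ++ " " ++ f) < c (f ++ " " ++ o) ∨
          (c (f ++ " " ++ o) = c (o ++ " " ++ f) ∧ d2 o < d2 f))

def pvW (fr gs : List String) (f o : String) : Bool := pvw (pvC gs) (pvIdxF fr gs) f o

def pvS (fr gs : List String) (f : String) : Int :=
  (fr.countP (fun o => decide (o ≠ f) && pvW fr gs f o) : Int)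

-- ---------- A-side characterisation ----------

def pvBump (a : List Int) (k : Nat) : List Int := a.set k (a.getD k 0 + 1)

def pvStep (W : Nat → Nat → Bool) (a : List Int) (i j : Nat) : List Int :=
  if W i j then pvBump a i else if W j i then pvBump a j else a

def pvContrib (W : Nat → Nat → Bool) (k : Nat) (p : Nat × Nat) : Int :=
  (if p.1 = k ∧ W k p.2 = true then 1 else 0) + (if p.2 = k ∧ W k p.1 = true then 1 else 0)

def pvT (n : Nat) : List (Nat × Nat) :=
  (List.range n).flatMap (fun i => (List.range' (i + 1) (n - (i + 1))).map (fun j => (i, j)))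

def pvWf (dic dic2 : PySem.Dict String Int) (fr : List String) (i j : Nat) : Bool :=
  pvw (fun s => dic.getD s 0) (fun x => dic2.getD x 0) (fr.getD i "") (fr.getD j "")

lemma pvGifts_fst (gs : List String) : ∀ (st : PySem.Dict String Int × PySem.Dict String Int),
    (gs.foldl pvGiftStepA st).1 = gs.foldl (fun d g => d.insert g (d.getD g 0 + 1)) st.1 := by
  induction gs with
  | nil => intro st; rfl
  | cons g t ih => intro st; rw [List.foldl_cons, List.foldl_cons, ih]; rfl

lemma pvGifts_snd (gs : List String) : ∀ (st : PySem.Dict String Int × PySem.Dict String Int),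
    (gs.foldl pvGiftStepA st).2 = gs.foldl pvD2fun st.2 := by
  induction gs with
  | nil => intro st; rfl
  | cons g t ih => intro st; rw [List.foldl_cons, List.foldl_cons, ih]; rfl

lemma pvGiftsB_fst (gs : List String) : ∀ (st : PySem.Dict String Int × PySem.Dict String Int),
    (gs.foldl pvGiftStepB st).1 = gs.foldl (fun d g => d.insert g (d.getD g 0 + 1)) st.1 := by
  induction gs with
  | nil => intro st; rfl
  | cons g t ih => intro st; rw [List.foldl_cons, List.foldl_cons, ih]; rfl

lemma pvGiftsB_snd (gs : List String) : ∀ (st : PySem.Dict String Int × PySem.Dict String Int),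
    (gs.foldl pvGiftStepB st).2 = gs.foldl pvD2fun st.2 := by
  induction gs with
  | nil => intro st; rfl
  | cons g t ih => intro st; rw [List.foldl_cons, List.foldl_cons, ih]; rfl

lemma pvPairDict_getD (fr : List String) (s : String) : (pvPairDict fr).getD s 0 = 0 := by
  have inner : ∀ (i : String) (l : List String) (d : PySem.Dict String Int),
      (∀ s, d.getD s 0 = 0) → ∀ s,
      (l.foldl (fun d j => if i == j then d else d.insert (i ++ " " ++ j) 0) d).getD s 0 = 0 := by
    intro i l
    induction l with
    | nil => intro d hd s; exact hd s
    | cons x t ih =>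
      intro d hd s
      rw [List.foldl_cons]
      apply ih
      intro s'
      by_cases h : (i == x) = true
      · rw [if_pos h]; exact hd s'
      · rw [if_neg h, PySem.Dict.getD_insert]
        by_cases h2 : s' = i ++ " " ++ x
        · rw [if_pos h2]
        · rw [if_neg h2]; exact hd s'
  have outer : ∀ (l : List String) (d : PySem.Dict String Int),
      (∀ s, d.getD s 0 = 0) → ∀ s,
      (l.foldl (fun d i => fr.foldl (fun d j => if i == j then d else d.insert (i ++ " " ++ j) 0) d) d).getD s 0 = 0 := by
    intro l
    induction l with
    | nil => intro d hd s; exact hd s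
    | cons x t ih =>
      intro d hd s
      rw [List.foldl_cons]
      exact ih _ (inner x fr d hd) s
  exact outer fr PySem.Dict.empty (fun s => by simp [PySem.Dict.getD_empty]) s

lemma pvInitA_fst (fr : List String) :
    (pvInitA fr).1 = (List.range fr.length).map (fun _ => (0 : Int)) := by
  unfold pvInitA
  rw [show (fun (st : List Int × PySem.Dict String Int) (i : Int) =>
        (st.1 ++ [(0 : Int)], st.2.insert (PySem.List.pyGetD fr i "") 0))
      = (fun (st : List Int × PySem.Dict String Int) (i : Int) =>
        ((fun (a : List Int) (_ : Int) => a ++ [(0 : Int)]) st.1 i,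
         (fun (d : PySem.Dict String Int) (i : Int) => d.insert (PySem.List.pyGetD fr i "") 0) st.2 i))
      from rfl]
  rw [PySem.List.foldl_prod_mk (fun (a : List Int) (_ : Int) => a ++ [(0 : Int)])
    (fun (d : PySem.Dict String Int) (i : Int) => d.insert (PySem.List.pyGetD fr i "") 0)]
  show (PySem.List.pyRange 0 (fr.length : Int) 1).foldl (fun (a : List Int) (_ : Int) => a ++ [(0 : Int)]) [] = _
  rw [show (fun (a : List Int) (_ : Int) => a ++ [(0 : Int)])
      = (fun (acc : List Int) (x : Int) => acc ++ [(fun (_ : Int) => (0 : Int)) x]) from rfl]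
  rw [PySem.List.foldl_append_singleton_eq_map (fun (_ : Int) => (0 : Int))]
  rw [PySem.List.pyRange_zero_nat, List.map_map]
  rfl

lemma pvInitA_snd (fr : List String) :
    (pvInitA fr).2 = fr.foldl (fun (d : PySem.Dict String Int) f => d.insert f 0) PySem.Dict.empty := by
  unfold pvInitA
  rw [show (fun (st : List Int × PySem.Dict String Int) (i : Int) =>
        (st.1 ++ [(0 : Int)], st.2.insert (PySem.List.pyGetD fr i "") 0))
      = (fun (st : List Int × PySem.Dict String Int) (i : Int) =>
        ((fun (a : List Int) (_ : Int) => a ++ [(0 : Int)]) st.1 i,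
         (fun (d : PySem.Dict String Int) (i : Int) => d.insert (PySem.List.pyGetD fr i "") 0) st.2 i))
      from rfl]
  rw [PySem.List.foldl_prod_mk (fun (a : List Int) (_ : Int) => a ++ [(0 : Int)])
    (fun (d : PySem.Dict String Int) (i : Int) => d.insert (PySem.List.pyGetD fr i "") 0)]
  show (PySem.List.pyRange 0 (fr.length : Int) 1).foldl
      (fun (d : PySem.Dict String Int) (i : Int) => d.insert (PySem.List.pyGetD fr i "") 0) PySem.Dict.empty = _
  rw [show (fun (d : PySem.Dict String Int) (i : Int) => d.insert (PySem.List.pyGetD fr i "") 0)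
      = (fun (acc : PySem.Dict String Int) (j : Int) =>
          (fun (d : PySem.Dict String Int) (x : String) => d.insert x 0) acc (PySem.List.pyGetD fr j "")) from rfl]
  rw [PySem.List.foldl_pyRange_zero_pyGetD' fr "" (fun (d : PySem.Dict String Int) (x : String) => d.insert x 0)
    PySem.Dict.empty]

lemma pvStep_length (W : Nat → Nat → Bool) (a : List Int) (i j : Nat) :
    (pvStep W a i j).length = a.length := by
  unfold pvStep; split_ifs <;> simp [pvBump]

lemma pvBump_getD (a : List Int) (k m : Nat) (hk : k < a.length) :
    (pvBump a k).getD m 0 = a.getD m 0 + (if m = k then 1 else 0) := by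
  unfold pvBump
  by_cases h : m = k
  · subst h
    rw [if_pos rfl]
    conv_lhs => rw [List.getD_eq_getElem?_getD]
    rw [List.getElem?_set, if_pos rfl, if_pos hk, Option.getD_some]
  · rw [if_neg h, add_zero]
    conv_lhs => rw [List.getD_eq_getElem?_getD]
    rw [List.getElem?_set, if_neg (fun hc => h hc.symm)]
    conv_rhs => rw [List.getD_eq_getElem?_getD]

lemma pvStep_getD (W : Nat → Nat → Bool) (hW : ∀ x y, W x y = true → W y x = true → False)
    (a : List Int) (i j : Nat) (hij : i ≠ j) (hi : i < a.length) (hj : j < a.length) (k : Nat) :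
    (pvStep W a i j).getD k 0 = a.getD k 0 + pvContrib W k (i, j) := by
  unfold pvStep pvContrib
  by_cases hik : k = i
  · subst hik
    by_cases h1 : W k j = true
    · rw [if_pos h1, pvBump_getD a k k hi, if_pos rfl, if_pos ⟨rfl, h1⟩,
        if_neg (fun hc => hij hc.1.symm)]
      ring
    · rw [if_neg h1, if_neg (fun hc : k = k ∧ W k j = true => h1 hc.2)]
      by_cases h2 : W j k = true
      · rw [if_pos h2, pvBump_getD a j k hj, if_neg (fun hc : k = j => hij hc),
          if_neg (fun hc => hij hc.1.symm)]
        ring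
      · rw [if_neg h2, if_neg (fun hc => hij hc.1.symm)]
        ring
  · by_cases hjk : k = j
    · subst hjk
      by_cases h1 : W i k = true
      · rw [if_pos h1, pvBump_getD a i k hi, if_neg (fun hc : k = i => hik hc),
          if_neg (fun hc => hik hc.1.symm), if_neg (fun hc => hW _ _ h1 hc.2)]
        ring
      · rw [if_neg h1]
        by_cases h2 : W k i = true
        · rw [if_pos h2, pvBump_getD a k k hj, if_pos rfl, if_neg (fun hc => hik hc.1.symm),
            if_pos ⟨rfl, h2⟩]
          ring
        · rw [if_neg h2, if_neg (fun hc => hik hc.1.symm), if_neg (fun hc => h2 hc.2)]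
          ring
    · have e1 : (if i = k ∧ W k j = true then (1 : Int) else 0) = 0 :=
        if_neg (fun hc => hik hc.1.symm)
      have e2 : (if j = k ∧ W k i = true then (1 : Int) else 0) = 0 :=
        if_neg (fun hc => hjk hc.1.symm)
      by_cases h1 : W i j = true
      · rw [if_pos h1, pvBump_getD a i k hi, if_neg (fun hc : k = i => hik hc), e1, e2]
        ring
      · rw [if_neg h1]
        by_cases h2 : W j i = true
        · rw [if_pos h2, pvBump_getD a j k hj, if_neg (fun hc : k = j => hjk hc), e1, e2]
          ring
        · rw [if_neg h2, e1, e2]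
          ring

lemma pvF_length (W : Nat → Nat → Bool) (P : List (Nat × Nat)) :
    ∀ (a : List Int), (P.foldl (fun a p => pvStep W a p.1 p.2) a).length = a.length := by
  induction P with
  | nil => intro a; rfl
  | cons p t ih => intro a; rw [List.foldl_cons, ih, pvStep_length]

lemma pvF_getD (W : Nat → Nat → Bool) (hW : ∀ x y, W x y = true → W y x = true → False)
    (P : List (Nat × Nat)) :
    ∀ (a : List Int), (∀ p ∈ P, p.1 ≠ p.2 ∧ p.1 < a.length ∧ p.2 < a.length) → ∀ k,
    (P.foldl (fun a p => pvStep W a p.1 p.2) a).getD k 0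
      = a.getD k 0 + (P.map (pvContrib W k)).sum := by
  induction P with
  | nil => intro a _ k; simp
  | cons p t ih =>
    intro a hb k
    have hp := hb p (List.mem_cons_self ..)
    rw [List.foldl_cons, ih (pvStep W a p.1 p.2)
        (fun q hq => by rw [pvStep_length]; exact hb q (List.mem_cons_of_mem _ hq)) k]
    rw [pvStep_getD W hW a p.1 p.2 hp.1 hp.2.1 hp.2.2 k]
    simp only [List.map_cons, List.sum_cons]
    ring

lemma pvSumPick (l : List Nat) (hl : l.Nodup) (k : Nat) (g : Nat → Int) :
    (l.map (fun j => if j = k then g j else 0)).sum = if k ∈ l then g k else 0 := by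
  induction l with
  | nil => simp
  | cons x t ih =>
    rw [List.nodup_cons] at hl
    rw [List.map_cons, List.sum_cons, ih hl.2]
    by_cases hx : x = k
    · subst hx; simp [hl.1]
    · rw [if_neg hx, zero_add]
      by_cases hm : k ∈ t
      · rw [if_pos hm, if_pos (List.mem_cons_of_mem x hm)]
      · rw [if_neg hm, if_neg (fun hc => (List.mem_cons.mp hc).elim (fun h => hx h.symm) hm)]

lemma pvSum_flatMap {α β : Type} (l : List α) (f : α → List β) (g : β → Int) :
    ((l.flatMap f).map g).sum = (l.map (fun a => ((f a).map g).sum)).sum := by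
  induction l with
  | nil => simp
  | cons x t ih => simp [List.flatMap_cons, ih]

lemma pvT_mem (n : Nat) (p : Nat × Nat) (hp : p ∈ pvT n) : p.1 < p.2 ∧ p.2 < n := by
  unfold pvT at hp
  simp only [List.mem_flatMap, List.mem_map, List.mem_range, List.mem_range'_1] at hp
  obtain ⟨i, hi, j, hj, rfl⟩ := hp
  constructor <;> omega

lemma pvTriSum (W : Nat → Nat → Bool) (n k : Nat) (hk : k < n) (hWk : W k k = false) :
    ((pvT n).map (pvContrib W k)).sum
      = ((List.range n).map (fun j => if (decide (j ≠ k) && W k j) = true then (1 : Int) else 0)).sum := by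
  have hterm : ∀ i ∈ List.range n,
      (((List.range' (i + 1) (n - (i + 1))).map (fun j => (i, j))).map (pvContrib W k)).sum
      = (if i = k then ((List.range' (k + 1) (n - (k + 1))).map
            (fun j => if W k j = true then (1 : Int) else 0)).sum else 0)
        + (if i < k then (if W k i = true then (1 : Int) else 0) else 0) := by
    intro i hi
    rw [List.mem_range] at hi
    rw [List.map_map]
    have hsum : ((List.range' (i + 1) (n - (i + 1))).map (pvContrib W k ∘ fun j => (i, j))).sum
        = ((List.range' (i + 1) (n - (i + 1))).map (fun j => if i = k ∧ W k j = true then (1 : Int) else 0)).sum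
          + ((List.range' (i + 1) (n - (i + 1))).map
              (fun j => if j = k then (if W k i = true then (1 : Int) else 0) else 0)).sum := by
      rw [← PySem.List.sum_map_add_int]
      apply congrArg
      apply List.map_congr_left
      intro j hj
      simp only [Function.comp, pvContrib]
      congr 1
      by_cases h : j = k <;> by_cases h2 : W k i = true <;> simp [h, h2]
    rw [hsum]
    congr 1
    · by_cases h : i = k
      · rw [if_pos h, h]
        apply congrArg
        apply List.map_congr_left
        intro j hj
        by_cases hW : W k j = true
        · rw [if_pos ⟨rfl, hW⟩, if_pos hW]
        · rw [if_neg (fun hc => hW hc.2), if_neg hW]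
      · rw [if_neg h]
        apply List.sum_eq_zero
        intro x hx
        rw [List.mem_map] at hx
        obtain ⟨j, hj, rfl⟩ := hx
        simp [h]
    · have hpick := pvSumPick (List.range' (i + 1) (n - (i + 1)))
        (List.nodup_range' 1 Nat.one_pos)
        k (fun _ => if W k i = true then (1 : Int) else 0)
      simp only [] at hpick
      rw [hpick]
      by_cases h : i < k
      · rw [if_pos, if_pos h]
        rw [List.mem_range'_1]
        omega
      · rw [if_neg, if_neg h]
        rw [List.mem_range'_1]
        omega
  unfold pvT
  rw [pvSum_flatMap, List.map_congr_left hterm, PySem.List.sum_map_add_int]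
  have hsplit : List.range n = List.range k ++ (List.range (n - k)).map (fun x => k + x) := by
    rw [← List.range_add]; congr 1; omega
  have hA : ((List.range n).map (fun i => if i = k then
        ((List.range' (k + 1) (n - (k + 1))).map (fun j => if W k j = true then (1 : Int) else 0)).sum
        else 0)).sum
      = ((List.range' (k + 1) (n - (k + 1))).map (fun j => if W k j = true then (1 : Int) else 0)).sum := by
    have hpick := pvSumPick (List.range n) List.nodup_range k
      (fun _ => ((List.range' (k + 1) (n - (k + 1))).map (fun j => if W k j = true then (1 : Int) else 0)).sum)
    simp only [] at hpick
    rw [hpick, if_pos (List.mem_range.mpr hk)]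
  have hB : ((List.range n).map (fun i => if i < k then (if W k i = true then (1 : Int) else 0) else 0)).sum
      = ((List.range k).map (fun i => if W k i = true then (1 : Int) else 0)).sum := by
    rw [hsplit, List.map_append, List.sum_append]
    have h1 : (List.range k).map (fun i => if i < k then (if W k i = true then (1 : Int) else 0) else 0)
        = (List.range k).map (fun i => if W k i = true then (1 : Int) else 0) := by
      apply List.map_congr_left
      intro i hi
      rw [List.mem_range] at hi
      rw [if_pos hi]
    have h2 : (((List.range (n - k)).map (fun x => k + x)).map
        (fun i => if i < k then (if W k i = true then (1 : Int) else 0) else 0)).sum = 0 := by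
      apply List.sum_eq_zero
      intro x hx
      simp only [List.map_map, List.mem_map, Function.comp] at hx
      obtain ⟨y, hy, rfl⟩ := hx
      rw [if_neg (by omega)]
    rw [h1, h2, add_zero]
  rw [hA, hB]
  have hsplit2 : List.range (n - k) = List.range 1 ++ (List.range (n - (k + 1))).map (fun x => 1 + x) := by
    rw [← List.range_add]; congr 1; omega
  rw [hsplit, hsplit2, List.map_append, List.map_append, List.sum_append, List.map_append,
    List.sum_append]
  have hr1 : ((List.range k).map (fun j => if (decide (j ≠ k) && W k j) = true then (1 : Int) else 0)).sum
      = ((List.range k).map (fun i => if W k i = true then (1 : Int) else 0)).sum := by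
    apply congrArg
    apply List.map_congr_left
    intro i hi
    rw [List.mem_range] at hi
    simp [Nat.ne_of_lt hi]
  have hr2 : (((List.range 1).map (fun x => k + x)).map
      (fun j => if (decide (j ≠ k) && W k j) = true then (1 : Int) else 0)).sum = 0 := by
    simp [hWk]
  have hr3 : ((((List.range (n - (k + 1))).map (fun x => 1 + x)).map (fun x => k + x)).map
      (fun j => if (decide (j ≠ k) && W k j) = true then (1 : Int) else 0)).sum
      = ((List.range' (k + 1) (n - (k + 1))).map (fun j => if W k j = true then (1 : Int) else 0)).sum := by
    rw [List.range'_eq_map_range]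
    simp only [List.map_map]
    apply congrArg
    apply List.map_congr_left
    intro x hx
    simp only [Function.comp]
    have he : k + (1 + x) = k + 1 + x := by omega
    simp only [he]
    rw [decide_eq_true (show k + 1 + x ≠ k by omega), Bool.true_and]
  rw [hr1, hr2, hr3]
  ring

lemma pvw_excl (c d2 : String → Int) (x y : String) :
    pvw c d2 x y = true → pvw c d2 y x = true → False := by
  simp only [pvw, decide_eq_true_eq]
  omega

lemma pvw_irrefl (c d2 : String → Int) (x : String) : pvw c d2 x x = false := by
  simp only [pvw, decide_eq_false_iff_not]
  omega

lemma pvCmpLoopA_eq_pvF (dic dic2 : PySem.Dict String Int) (fr : List String) (a0 : List Int) :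
    pvCmpLoopA dic dic2 fr a0
      = (pvT fr.length).foldl (fun a p => pvStep (pvWf dic dic2 fr) a p.1 p.2) a0 := by
  unfold pvCmpLoopA pvT
  rw [PySem.List.pyRange_zero_nat, List.foldl_map, List.foldl_flatMap]
  apply PySem.List.foldl_congr_mem'
  intro i hi arr
  rw [List.foldl_map, PySem.List.pyRange_one, List.foldl_map]
  have hT : (((fr.length : Int)) - ((i : Int) + 1)).toNat = fr.length - (i + 1) := by omega
  rw [hT, List.range'_eq_map_range, List.foldl_map]
  apply PySem.List.foldl_congr_mem'
  intro m hm a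
  have hJ : ((i : Int) + 1 + (m : Int)) = (((i + 1 + m : Nat)) : Int) := by push_cast; ring
  rw [hJ]
  simp only [PySem.List.pyGetD_natCast, PySem.List.pySetD_natCast]
  show _ = pvStep (pvWf dic dic2 fr) a i (i + 1 + m)
  unfold pvStep pvWf pvw pvBump
  by_cases h1 : dic.getD (fr.getD i "" ++ " " ++ fr.getD (i + 1 + m) "") 0
      < dic.getD (fr.getD (i + 1 + m) "" ++ " " ++ fr.getD i "") 0
  · rw [if_pos h1, if_neg (by simp only [decide_eq_true_eq]; omega),
      if_pos (by simp only [decide_eq_true_eq]; omega)]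
  · rw [if_neg h1]
    by_cases h2 : dic.getD (fr.getD i "" ++ " " ++ fr.getD (i + 1 + m) "") 0
        > dic.getD (fr.getD (i + 1 + m) "" ++ " " ++ fr.getD i "") 0
    · rw [if_pos h2, if_pos (by simp only [decide_eq_true_eq]; omega)]
    · rw [if_neg h2]
      by_cases h3 : dic2.getD (fr.getD i "" ) 0 > dic2.getD (fr.getD (i + 1 + m) "") 0
      · rw [if_pos h3, if_pos (by simp only [decide_eq_true_eq]; omega)]
      · rw [if_neg h3]
        by_cases h4 : dic2.getD (fr.getD i "") 0 < dic2.getD (fr.getD (i + 1 + m) "") 0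
        · rw [if_pos h4, if_neg (by simp only [decide_eq_true_eq]; omega),
            if_pos (by simp only [decide_eq_true_eq]; omega)]
        · rw [if_neg h4, if_neg (by simp only [decide_eq_true_eq]; omega),
            if_neg (by simp only [decide_eq_true_eq]; omega)]

lemma pvCmpLoopA_length (dic dic2 : PySem.Dict String Int) (fr : List String) (a0 : List Int) :
    (pvCmpLoopA dic dic2 fr a0).length = a0.length := by
  rw [pvCmpLoopA_eq_pvF, pvF_length]

lemma pvCmpLoopA_getD (dic dic2 : PySem.Dict String Int) (fr : List String) (a0 : List Int)
    (hlen : a0.length = fr.length) (h0 : ∀ k, a0.getD k 0 = 0) (k : Nat) (hk : k < fr.length) :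
    (pvCmpLoopA dic dic2 fr a0).getD k 0
      = ((List.range fr.length).countP
          (fun j => decide (j ≠ k) && pvWf dic dic2 fr k j) : Int) := by
  rw [pvCmpLoopA_eq_pvF,
    pvF_getD (pvWf dic dic2 fr) (fun x y => pvw_excl _ _ _ _) (pvT fr.length) a0
      (fun p hp => by
        have := pvT_mem fr.length p hp
        exact ⟨by omega, by omega, by omega⟩) k,
    h0, zero_add,
    pvTriSum (pvWf dic dic2 fr) fr.length k hk (pvw_irrefl _ _ _),
    PySem.List.sum_map_ite_one_zero]

lemma pvMapGetD (l : List String) (d : String) :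
    (List.range l.length).map (fun j => l.getD j d) = l := by
  apply List.ext_getElem (by simp)
  intro k h1 h2
  simp [List.getElem?_eq_getElem h2]

lemma pvCountP_range (fr : List String) (p : String → Bool) :
    fr.countP p = (List.range fr.length).countP (fun j => p (fr.getD j "")) := by
  conv_lhs => rw [← pvMapGetD fr ""]
  rw [List.countP_map]
  rfl

-- A computes max over the per-friend beat counts
lemma pvA_char (fr gs : List String) (hnd : fr.Nodup) :
    solution fr gs = (PySem.List.max? (fr.map (pvS fr gs)) (fun x => x)).getD 0 := by
  simp only [solution]
  have hAfst : (gs.foldl pvGiftStepA (pvPairDict fr, (pvInitA fr).2)).1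
      = gs.foldl (fun d g => d.insert g (d.getD g 0 + 1)) (pvPairDict fr) :=
    pvGifts_fst gs (pvPairDict fr, (pvInitA fr).2)
  have hc : ∀ s, (gs.foldl pvGiftStepA (pvPairDict fr, (pvInitA fr).2)).1.getD s 0 = pvC gs s := by
    intro s
    rw [hAfst, PySem.Dict.getD_foldl_insert_add_one, pvPairDict_getD, zero_add, pvC]
  have hd2 : (gs.foldl pvGiftStepA (pvPairDict fr, (pvInitA fr).2)).2 = pvIdxD fr gs := by
    rw [pvGifts_snd, pvInitA_snd, pvIdxD]
  have hlen0 : (pvInitA fr).1.length = fr.length := by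
    rw [pvInitA_fst]; simp
  have h00 : ∀ k, (pvInitA fr).1.getD k 0 = 0 := by
    intro k
    rw [pvInitA_fst]
    by_cases hk : k < fr.length
    · rw [List.getD_eq_getElem _ _ (by simpa using hk)]
      simp
    · rw [List.getD_eq_default _ _ (by simpa using (by omega : fr.length ≤ k))]
  have hlist : pvCmpLoopA (gs.foldl pvGiftStepA (pvPairDict fr, (pvInitA fr).2)).1
      (gs.foldl pvGiftStepA (pvPairDict fr, (pvInitA fr).2)).2 fr (pvInitA fr).1
      = fr.map (pvS fr gs) := by
    apply List.ext_getElem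
    · rw [pvCmpLoopA_length, hlen0]; simp
    · intro k h1 h2
      have hk : k < fr.length := by
        rw [pvCmpLoopA_length, hlen0] at h1; exact h1
      rw [← List.getD_eq_getElem _ 0 h1, ← List.getD_eq_getElem _ 0 h2]
      rw [pvCmpLoopA_getD _ _ fr (pvInitA fr).1 hlen0 h00 k hk]
      rw [List.getD_eq_getElem _ 0 (by simpa using hk), List.getElem_map]
      unfold pvS
      rw [pvCountP_range fr]
      apply congrArg
      apply List.countP_congr
      intro j hj
      rw [List.mem_range] at hj
      unfold pvWf pvW pvIdxF
      have hcw : (fun s => (gs.foldl pvGiftStepA (pvPairDict fr, (pvInitA fr).2)).1.getD s 0) = pvC gs :=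
        funext hc
      rw [hcw, hd2]
      have hne : (decide (j ≠ k)) = (decide (fr.getD j "" ≠ fr.getD k "")) := by
        rw [List.getD_eq_getElem fr "" hj, List.getD_eq_getElem fr "" hk]
        by_cases h : j = k
        · subst h; simp
        · simp only [decide_eq_decide]
          constructor
          · intro _ hcon
            exact h (List.Nodup.getElem_inj_iff hnd |>.mp hcon)
          · intro _; exact h
      rw [hne, ← List.getD_eq_getElem fr "" hk]
  rw [hlist]

-- ---------- string split facts ----------

lemma pvGoNonspace (x : List Char) (hx : ∀ c ∈ x, PySem.Chars.isspace c = false) :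
    ∀ (r cur : List Char) (acc : List (List Char)),
    PySem.Chars.split₀.go (x ++ r) cur acc = PySem.Chars.split₀.go r (x.reverse ++ cur) acc := by
  induction x with
  | nil => intro r cur acc; simp
  | cons c t ih =>
    intro r cur acc
    rw [List.cons_append, PySem.Chars.split₀.go.eq_def]
    simp only [hx c (List.mem_cons_self ..)]
    rw [ih (fun d hd => hx d (List.mem_cons_of_mem _ hd)) r (c :: cur) acc]
    simp

lemma pvGoFinal (y : List Char) (hy : y ≠ []) (hys : ∀ c ∈ y, PySem.Chars.isspace c = false)
    (acc : List (List Char)) :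
    PySem.Chars.split₀.go y [] acc = acc.reverse ++ [y] := by
  have h := pvGoNonspace y hys [] [] acc
  rw [List.append_nil] at h
  rw [h, PySem.Chars.split₀.go.eq_def]
  simp only [List.append_nil]
  have : y.reverse.isEmpty = false := by
    cases hcase : y.reverse with
    | nil => exact absurd (by simpa using hcase) hy
    | cons a b => rfl
  rw [this]
  simp

lemma pvSplitPairChars (x y : List Char) (hx : x ≠ []) (hy : y ≠ [])
    (hxs : ∀ c ∈ x, PySem.Chars.isspace c = false) (hys : ∀ c ∈ y, PySem.Chars.isspace c = false) :
    PySem.Chars.split₀ (x ++ ' ' :: y) = [x, y] := by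
  show PySem.Chars.split₀.go (x ++ ' ' :: y) [] [] = [x, y]
  rw [pvGoNonspace x hxs (' ' :: y) [] []]
  rw [PySem.Chars.split₀.go.eq_def]
  have hsp : PySem.Chars.isspace ' ' = true := by decide
  have hne : x.reverse.isEmpty = false := by
    cases hcase : x.reverse with
    | nil => exact absurd (by simpa using hcase) hx
    | cons a b => rfl
  simp only [hsp, if_true, hne, Bool.false_eq_true, if_false, List.append_nil]
  rw [List.reverse_reverse, pvGoFinal y hy hys [x]]
  rfl

lemma pvStrSplitPair (x y g : String) (hx : x.toList ≠ []) (hy : y.toList ≠ [])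
    (hxs : ∀ c ∈ x.toList, PySem.Chars.isspace c = false)
    (hys : ∀ c ∈ y.toList, PySem.Chars.isspace c = false)
    (hg : g.toList = x.toList ++ ' ' :: y.toList) :
    PySem.Str.split₀ g = [x, y] := by
  show List.map String.ofList (PySem.Chars.split₀ g.toList) = [x, y]
  rw [hg, pvSplitPairChars _ _ hx hy hxs hys]
  simp [String.ofList_toList]

lemma pvJoinToList (x y : String) : (x ++ " " ++ y).toList = x.toList ++ ' ' :: y.toList := by
  simp [String.toList_append]

lemma pvStrOfJoin (x y g : String) (hg : g.toList = x.toList ++ ' ' :: y.toList) :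
    g = x ++ " " ++ y := by
  have h1 : g.toList = (x ++ " " ++ y).toList := by rw [hg, pvJoinToList]
  have := congrArg String.ofList h1
  rwa [String.ofList_toList, String.ofList_toList] at this

-- ---------- rank-fold facts ----------

lemma pvRankAux (l : List Int) : ∀ (s : Int) (d : PySem.Dict Int Int) (v : Int),
    ((PySem.List.enumerate l s).foldl
      (fun (rank : PySem.Dict Int Int) rv =>
        if rank.contains rv.2 then rank else rank.insert rv.2 rv.1) d).get? v
    = if d.contains v then d.get? v
      else (PySem.List.index? l v).map (fun k => s + (k : Int)) := by
  induction l with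
  | nil =>
    intro s d v
    rw [PySem.List.enumerate_nil, List.foldl_nil]
    by_cases h : d.contains v = true
    · rw [if_pos h]
    · rw [if_neg h]
      have hgn : d.get? v = none := by
        rw [PySem.Dict.get?_eq_none_iff_contains]
        simpa using h
      rw [hgn, PySem.List.index?_eq_idxOf?]
      simp
  | cons x t ih =>
    intro s d v
    rw [PySem.List.enumerate_cons, List.foldl_cons]
    by_cases hv : v = x
    · subst hv
      have hd' : ((if d.contains v then d else d.insert v s) : PySem.Dict Int Int).contains v = true := by
        by_cases h : d.contains v = true
        · rw [if_pos h]; exact h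
        · rw [if_neg h]; exact PySem.Dict.contains_insert_self d v s
      rw [ih (s + 1) _ v, if_pos hd']
      by_cases h : d.contains v = true
      · rw [if_pos h, if_pos h]
      · rw [if_neg h, if_neg h, PySem.Dict.get?_insert_self, PySem.List.index?_cons_self]
        simp
    · have hcont : ((if d.contains x then d else d.insert x s) : PySem.Dict Int Int).contains v
          = d.contains v := by
        by_cases h : d.contains x = true
        · rw [if_pos h]
        · rw [if_neg h, PySem.Dict.contains_insert]
          have : (v == x) = false := by simpa using hv
          rw [this, Bool.false_or]
      rw [ih (s + 1) _ v, hcont]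
      by_cases h : d.contains v = true
      · rw [if_pos h, if_pos h]
        by_cases h2 : d.contains x = true
        · rw [if_pos h2]
        · rw [if_neg h2, PySem.Dict.get?_insert_of_ne d _ hv]
      · rw [if_neg h, if_neg h]
        rw [PySem.List.index?_cons_of_ne t (fun he => hv he.symm)]
        cases hidx : PySem.List.index? t v with
        | none => simp
        | some k =>
          simp only [Option.map_some]
          have he : s + 1 + (k : Int) = s + ((k : Nat) + 1 : Nat) := by push_cast; ring
          simp [he]

lemma pvRankFold_get? (l : List Int) (v : Int) :
    (pvRankFold l).get? v = (PySem.List.index? l v).map (fun k => (k : Int)) := by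
  unfold pvRankFold
  rw [pvRankAux l 0 PySem.Dict.empty v, if_neg (by simp [PySem.Dict.contains_empty])]
  cases hidx : PySem.List.index? l v with
  | none => simp
  | some k => simp

lemma pvIdxSorted (l : List Int) (hp : l.Pairwise (· ≤ ·)) (v : Int) (hv : v ∈ l) :
    PySem.List.index? l v = some (l.countP (fun x => decide (x < v))) := by
  induction l with
  | nil => cases hv
  | cons x t ih =>
    rw [List.pairwise_cons] at hp
    by_cases hvx : v = x
    · subst hvx
      rw [PySem.List.index?_cons_self]
      congr 1
      rw [List.countP_cons]
      have h1 : t.countP (fun x_1 => decide (x_1 < v)) = 0 := by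
        rw [List.countP_eq_zero]
        intro a ha
        simpa using not_lt.mpr (hp.1 a ha)
      simp [h1]
    · have hvt : v ∈ t := by
        rcases List.mem_cons.mp hv with h | h
        · exact absurd h hvx
        · exact h
      rw [PySem.List.index?_cons_of_ne t (fun he => hvx he.symm), ih hp.2 hvt]
      simp only [Option.map_some]
      congr 1
      rw [List.countP_cons]
      have hxv : x < v := lt_of_le_of_ne (hp.1 v hvt) (fun he => hvx he.symm)
      simp [hxv]

-- ---------- the per-key delta of B's fix-up loop ----------

def pvTokA (g : String) : String := PySem.List.pyGetD (PySem.Str.split₀ g) 0 ""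
def pvTokB (g : String) : String := PySem.List.pyGetD (PySem.Str.split₀ g) 1 ""

def pvDelta (fr gs : List String) (g f : String) : Int :=
  if pvTokA g = pvTokB g ∨ (pvTokB g < pvTokA g ∧ (pvTokB g ++ " " ++ pvTokA g) ∈ gs) then 0
  else if pvC gs g = pvC gs (pvTokB g ++ " " ++ pvTokA g) then 0
  else
    if pvIdxF fr gs ((if pvC gs g > pvC gs (pvTokB g ++ " " ++ pvTokA g) then
          (pvTokA g, pvTokB g) else (pvTokB g, pvTokA g)).1)
        ≤ pvIdxF fr gs ((if pvC gs g > pvC gs (pvTokB g ++ " " ++ pvTokA g) then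
          (pvTokA g, pvTokB g) else (pvTokB g, pvTokA g)).2) then
      (if f = (if pvC gs g > pvC gs (pvTokB g ++ " " ++ pvTokA g) then
          (pvTokA g, pvTokB g) else (pvTokB g, pvTokA g)).1 then 1 else 0)
        + (if f = (if pvC gs g > pvC gs (pvTokB g ++ " " ++ pvTokA g) then
            (pvTokA g, pvTokB g) else (pvTokB g, pvTokA g)).2
            ∧ pvIdxF fr gs ((if pvC gs g > pvC gs (pvTokB g ++ " " ++ pvTokA g) then
                (pvTokA g, pvTokB g) else (pvTokB g, pvTokA g)).1)
              < pvIdxF fr gs ((if pvC gs g > pvC gs (pvTokB g ++ " " ++ pvTokA g) then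
                (pvTokA g, pvTokB g) else (pvTokB g, pvTokA g)).2) then -1 else 0)
    else 0

lemma pvCnt_getD (gs : List String) (s : String) :
    (PySem.Dict.counter gs).getD s 0 = pvC gs s := PySem.Dict.getD_counter gs s

lemma pvCnt_contains (gs : List String) (s : String) :
    (PySem.Dict.counter gs).contains s = decide (s ∈ gs) := by
  rw [PySem.Dict.contains_eq_decide_mem_keys, PySem.Dict.keys_counter]
  simp [PySem.Set.mem_ofList]

lemma pvPairGetD (score : PySem.Dict String Int) (w l f : String) (hwl : w ≠ l)
    (c : Prop) [Decidable c] :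
    (if c then
        (score.insert w (score.getD w 0 + 1)).insert l
          ((score.insert w (score.getD w 0 + 1)).getD l 0 - 1)
      else score.insert w (score.getD w 0 + 1)).getD f 0
    = score.getD f 0 + ((if f = w then 1 else 0) + (if f = l ∧ c then -1 else 0)) := by
  have hlw : ¬ l = w := fun he => hwl he.symm
  by_cases hc : c
  · rw [if_pos hc]
    simp only [PySem.Dict.getD_insert]
    by_cases hfl : f = l
    · have hfw : ¬ f = w := fun he => hwl (by rw [← he, hfl])
      simp [hfl, hlw, hc] <;> ring
    · by_cases hfw : f = w
      · simp [hfw, hwl, hc]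
      · simp [hfl, hfw]
  · rw [if_neg hc]
    simp only [PySem.Dict.getD_insert]
    by_cases hfw : f = w
    · simp [hfw, hc]
    · simp [hfw, hc]

lemma pvAdjStep_getD (fr gs : List String) (score : PySem.Dict String Int) (g f : String) :
    (pvAdjStep (PySem.Dict.counter gs) (pvIdxD fr gs) score g).getD f 0
      = score.getD f 0 + pvDelta fr gs g f := by
  show ((if (pvTokA g == pvTokB g)
        || (decide (pvTokB g < pvTokA g)
            && (PySem.Dict.counter gs).contains (pvTokB g ++ " " ++ pvTokA g)) then score
      else if (PySem.Dict.counter gs).getD g 0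
          == (PySem.Dict.counter gs).getD (pvTokB g ++ " " ++ pvTokA g) 0 then score
      else
        let wl := if (PySem.Dict.counter gs).getD g 0
            > (PySem.Dict.counter gs).getD (pvTokB g ++ " " ++ pvTokA g) 0 then
            (pvTokA g, pvTokB g) else (pvTokB g, pvTokA g)
        if (pvIdxD fr gs).getD wl.1 0 ≤ (pvIdxD fr gs).getD wl.2 0 then
          if (pvIdxD fr gs).getD wl.1 0 < (pvIdxD fr gs).getD wl.2 0 then
            ((score.insert wl.1 (score.getD wl.1 0 + 1)).insert wl.2
              ((score.insert wl.1 (score.getD wl.1 0 + 1)).getD wl.2 0 - 1))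
          else score.insert wl.1 (score.getD wl.1 0 + 1)
        else score) : PySem.Dict String Int).getD f 0
      = score.getD f 0 + pvDelta fr gs g f
  simp only [pvDelta, pvCnt_getD, pvCnt_contains, pvIdxF]
  have hiff1 : ((pvTokA g == pvTokB g)
      || (decide (pvTokB g < pvTokA g) && decide ((pvTokB g ++ " " ++ pvTokA g) ∈ gs))) = true
      ↔ (pvTokA g = pvTokB g ∨ (pvTokB g < pvTokA g ∧ (pvTokB g ++ " " ++ pvTokA g) ∈ gs)) := by
    simp only [Bool.or_eq_true, Bool.and_eq_true, beq_iff_eq, decide_eq_true_eq]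
  have hiff2 : ((pvC gs g == pvC gs (pvTokB g ++ " " ++ pvTokA g))) = true
      ↔ pvC gs g = pvC gs (pvTokB g ++ " " ++ pvTokA g) := by
    simp only [beq_iff_eq]
  rw [if_congr hiff1 rfl rfl, if_congr hiff2 rfl rfl]
  by_cases h1 : pvTokA g = pvTokB g ∨ (pvTokB g < pvTokA g ∧ (pvTokB g ++ " " ++ pvTokA g) ∈ gs)
  · rw [if_pos h1, if_pos h1]; ring
  · rw [if_neg h1, if_neg h1]
    have hab : pvTokA g ≠ pvTokB g := fun he => h1 (Or.inl he)
    by_cases h2 : pvC gs g = pvC gs (pvTokB g ++ " " ++ pvTokA g)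
    · rw [if_pos h2, if_pos h2]; ring
    · rw [if_neg h2, if_neg h2]
      by_cases h3 : pvC gs g > pvC gs (pvTokB g ++ " " ++ pvTokA g)
      · rw [if_pos h3]
        dsimp only
        by_cases h4 : (pvIdxD fr gs).getD (pvTokA g) 0 ≤ (pvIdxD fr gs).getD (pvTokB g) 0
        · rw [if_pos h4, if_pos h4]
          exact pvPairGetD score (pvTokA g) (pvTokB g) f hab _
        · rw [if_neg h4, if_neg h4]; ring
      · rw [if_neg h3]
        dsimp only
        by_cases h4 : (pvIdxD fr gs).getD (pvTokB g) 0 ≤ (pvIdxD fr gs).getD (pvTokA g) 0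
        · rw [if_pos h4, if_pos h4]
          exact pvPairGetD score (pvTokB g) (pvTokA g) f (fun he => hab he.symm) _
        · rw [if_neg h4, if_neg h4]; ring

lemma pvFoldAdj_getD (fr gs : List String) (L : List String) :
    ∀ (score : PySem.Dict String Int) (f : String),
    (L.foldl (pvAdjStep (PySem.Dict.counter gs) (pvIdxD fr gs)) score).getD f 0
      = score.getD f 0 + (L.map (fun g => pvDelta fr gs g f)).sum := by
  induction L with
  | nil => intro score f; simp
  | cons g t ih =>
    intro score f
    rw [List.foldl_cons, ih, pvAdjStep_getD]
    simp only [List.map_cons, List.sum_cons]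
    ring

lemma pvAdjStep_keys (cnt idx : PySem.Dict String Int) (score : PySem.Dict String Int) (g : String)
    (ha : pvTokA g ∈ score.keys) (hb : pvTokB g ∈ score.keys) :
    (pvAdjStep cnt idx score g).keys = score.keys := by
  show ((if (pvTokA g == pvTokB g)
        || (decide (pvTokB g < pvTokA g)
            && cnt.contains (pvTokB g ++ " " ++ pvTokA g)) then score
      else if cnt.getD g 0 == cnt.getD (pvTokB g ++ " " ++ pvTokA g) 0 then score
      else
        if idx.getD ((if cnt.getD g 0 > cnt.getD (pvTokB g ++ " " ++ pvTokA g) 0 then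
              (pvTokA g, pvTokB g) else (pvTokB g, pvTokA g)).1) 0
            ≤ idx.getD ((if cnt.getD g 0 > cnt.getD (pvTokB g ++ " " ++ pvTokA g) 0 then
              (pvTokA g, pvTokB g) else (pvTokB g, pvTokA g)).2) 0 then
          if idx.getD ((if cnt.getD g 0 > cnt.getD (pvTokB g ++ " " ++ pvTokA g) 0 then
                (pvTokA g, pvTokB g) else (pvTokB g, pvTokA g)).1) 0
              < idx.getD ((if cnt.getD g 0 > cnt.getD (pvTokB g ++ " " ++ pvTokA g) 0 then
                (pvTokA g, pvTokB g) else (pvTokB g, pvTokA g)).2) 0 then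
            ((score.insert ((if cnt.getD g 0 > cnt.getD (pvTokB g ++ " " ++ pvTokA g) 0 then
                (pvTokA g, pvTokB g) else (pvTokB g, pvTokA g)).1)
                (score.getD ((if cnt.getD g 0 > cnt.getD (pvTokB g ++ " " ++ pvTokA g) 0 then
                  (pvTokA g, pvTokB g) else (pvTokB g, pvTokA g)).1) 0 + 1)).insert
              ((if cnt.getD g 0 > cnt.getD (pvTokB g ++ " " ++ pvTokA g) 0 then
                (pvTokA g, pvTokB g) else (pvTokB g, pvTokA g)).2)
              ((score.insert ((if cnt.getD g 0 > cnt.getD (pvTokB g ++ " " ++ pvTokA g) 0 then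
                  (pvTokA g, pvTokB g) else (pvTokB g, pvTokA g)).1)
                  (score.getD ((if cnt.getD g 0 > cnt.getD (pvTokB g ++ " " ++ pvTokA g) 0 then
                    (pvTokA g, pvTokB g) else (pvTokB g, pvTokA g)).1) 0 + 1)).getD
                ((if cnt.getD g 0 > cnt.getD (pvTokB g ++ " " ++ pvTokA g) 0 then
                  (pvTokA g, pvTokB g) else (pvTokB g, pvTokA g)).2) 0 - 1))
          else score.insert ((if cnt.getD g 0 > cnt.getD (pvTokB g ++ " " ++ pvTokA g) 0 then
              (pvTokA g, pvTokB g) else (pvTokB g, pvTokA g)).1)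
              (score.getD ((if cnt.getD g 0 > cnt.getD (pvTokB g ++ " " ++ pvTokA g) 0 then
                (pvTokA g, pvTokB g) else (pvTokB g, pvTokA g)).1) 0 + 1)
        else score) : PySem.Dict String Int).keys = score.keys
  have hkeys2 : ∀ (w l : String), w ∈ score.keys → l ∈ score.keys →
      ((score.insert w (score.getD w 0 + 1)).insert l
        ((score.insert w (score.getD w 0 + 1)).getD l 0 - 1)).keys = score.keys := by
    intro w l hw hl
    rw [PySem.Dict.keys_insert_of_contains, PySem.Dict.keys_insert_of_contains]
    · exact (PySem.Dict.contains_iff_mem_keys _ _).mpr hw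
    · rw [PySem.Dict.contains_insert]
      have := (PySem.Dict.contains_iff_mem_keys score l).mpr hl
      simp [this]
  have hkeys1 : ∀ (w : String), w ∈ score.keys →
      (score.insert w (score.getD w 0 + 1)).keys = score.keys := by
    intro w hw
    rw [PySem.Dict.keys_insert_of_contains]
    exact (PySem.Dict.contains_iff_mem_keys _ _).mpr hw
  split_ifs <;>
    first
    | rfl
    | exact hkeys2 _ _ ha hb
    | exact hkeys2 _ _ hb ha
    | exact hkeys1 _ ha
    | exact hkeys1 _ hb

lemma pvFoldAdj_keys (cnt idx : PySem.Dict String Int) (L : List String) :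
    ∀ (score : PySem.Dict String Int),
    (∀ g ∈ L, pvTokA g ∈ score.keys ∧ pvTokB g ∈ score.keys) →
    (L.foldl (pvAdjStep cnt idx) score).keys = score.keys := by
  induction L with
  | nil => intro score _; rfl
  | cons g t ih =>
    intro score hmem
    rw [List.foldl_cons]
    have hk : (pvAdjStep cnt idx score g).keys = score.keys :=
      pvAdjStep_keys cnt idx score g (hmem g (List.mem_cons_self ..)).1
        (hmem g (List.mem_cons_self ..)).2
    rw [ih _ (fun g' hg' => by rw [hk]; exact hmem g' (List.mem_cons_of_mem _ hg')), hk]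

-- ---------- the pointwise beat/tie/delta identity ----------

def pvDel (fr gs : List String) (f o : String) : Int :=
  if o ≠ f ∧ pvC gs (f ++ " " ++ o) ≠ pvC gs (o ++ " " ++ f) then
    (if (decide (o ≠ f) && pvW fr gs f o) = true then 1 else 0)
    - (if pvIdxF fr gs o < pvIdxF fr gs f then 1 else 0)
  else 0

lemma pvPointwise (fr gs : List String) (f o : String) :
    (if (decide (o ≠ f) && pvW fr gs f o) = true then (1 : Int) else 0)
      = (if pvIdxF fr gs o < pvIdxF fr gs f then (1 : Int) else 0) + pvDel fr gs f o := by
  unfold pvDel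
  by_cases hq : o ≠ f ∧ pvC gs (f ++ " " ++ o) ≠ pvC gs (o ++ " " ++ f)
  · rw [if_pos hq]; ring
  · rw [if_neg hq]
    by_cases hof : o = f
    · subst hof
      unfold pvW
      rw [pvw_irrefl]
      simp
    · have hce : pvC gs (f ++ " " ++ o) = pvC gs (o ++ " " ++ f) := by
        by_contra hc
        exact hq ⟨hof, hc⟩
      unfold pvW pvw
      rw [add_zero]
      by_cases hi : pvIdxF fr gs o < pvIdxF fr gs f
      · rw [if_pos hi, if_pos (by simp only [Bool.and_eq_true, decide_eq_true_eq]; exact ⟨hof, Or.inr ⟨hce, hi⟩⟩)]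
      · rw [if_neg hi, if_neg (by
          simp only [Bool.and_eq_true, decide_eq_true_eq]
          rintro ⟨-, h | ⟨-, h⟩⟩ <;> omega)]

-- ---------- the canonical key of an unordered pair ----------

def pvKey (gs : List String) (f o : String) : String :=
  if f < o then (if (f ++ " " ++ o) ∈ gs then f ++ " " ++ o else o ++ " " ++ f)
  else (if (o ++ " " ++ f) ∈ gs then o ++ " " ++ f else f ++ " " ++ o)

lemma pvCount_eq_zero_of_not_mem (gs : List String) (s : String) (h : s ∉ gs) : pvC gs s = 0 := by
  unfold pvC
  rw [List.count_eq_zero.mpr h]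
  rfl

lemma pvC_pos_mem (gs : List String) (s : String) (h : pvC gs s ≠ 0) : s ∈ gs := by
  by_contra hc
  exact h (pvCount_eq_zero_of_not_mem gs s hc)

-- the key-sum equals the friend-sum of deltas
lemma pvKeySum (fr gs : List String) (f : String) (hnd : fr.Nodup)
    (hname : ∀ x ∈ fr, x.toList ≠ [] ∧ ∀ c ∈ x.toList, PySem.Chars.isspace c = false)
    (hg : ∀ g ∈ gs, ∃ x ∈ fr, ∃ y ∈ fr, x ≠ y ∧ g.toList = x.toList ++ ' ' :: y.toList)
    (hf : f ∈ fr) :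
    ((PySem.Set.ofList gs).map (fun g => pvDelta fr gs g f)).sum
      = (fr.map (fun o => pvDel fr gs f o)).sum := by
  -- decomposition of any string appearing in gifts
  have hdec : ∀ g ∈ gs, ∃ x ∈ fr, ∃ y ∈ fr, x ≠ y ∧ g = x ++ " " ++ y ∧
      pvTokA g = x ∧ pvTokB g = y := by
    intro g hgm
    obtain ⟨x, hx, y, hy, hxy, hgl⟩ := hg g hgm
    refine ⟨x, hx, y, hy, hxy, pvStrOfJoin x y g hgl, ?_, ?_⟩
    · unfold pvTokA
      rw [pvStrSplitPair x y g (hname x hx).1 (hname y hy).1 (hname x hx).2 (hname y hy).2 hgl]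
      rfl
    · unfold pvTokB
      rw [pvStrSplitPair x y g (hname x hx).1 (hname y hy).1 (hname x hx).2 (hname y hy).2 hgl]
      rfl
  have hinj : ∀ x ∈ fr, ∀ y ∈ fr, ∀ x' ∈ fr, ∀ y' ∈ fr,
      x ++ " " ++ y = x' ++ " " ++ y' → x = x' ∧ y = y' := by
    intro x hx y hy x' hx' y' hy' he
    have h1 : PySem.Str.split₀ (x ++ " " ++ y) = [x, y] :=
      pvStrSplitPair x y _ (hname x hx).1 (hname y hy).1 (hname x hx).2 (hname y hy).2
        (pvJoinToList x y)
    have h2 : PySem.Str.split₀ (x' ++ " " ++ y') = [x', y'] :=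
      pvStrSplitPair x' y' _ (hname x' hx').1 (hname y' hy').1 (hname x' hx').2 (hname y' hy').2
        (pvJoinToList x' y')
    rw [he, h2] at h1
    simp only [List.cons.injEq, and_true] at h1
    exact ⟨h1.1.symm, h1.2.symm⟩
  -- toks of pvKey
  have hkeytok : ∀ o ∈ fr, o ≠ f →
      (pvKey gs f o = f ++ " " ++ o ∧ pvTokA (pvKey gs f o) = f ∧ pvTokB (pvKey gs f o) = o) ∨
      (pvKey gs f o = o ++ " " ++ f ∧ pvTokA (pvKey gs f o) = o ∧ pvTokB (pvKey gs f o) = f) := by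
    intro o ho hof
    have htf : ∀ u ∈ fr, ∀ v ∈ fr, pvTokA (u ++ " " ++ v) = u ∧ pvTokB (u ++ " " ++ v) = v := by
      intro u hu v hv
      have hs := pvStrSplitPair u v (u ++ " " ++ v) (hname u hu).1 (hname v hv).1
        (hname u hu).2 (hname v hv).2 (pvJoinToList u v)
      constructor
      · unfold pvTokA; rw [hs]; rfl
      · unfold pvTokB; rw [hs]; rfl
    unfold pvKey
    split_ifs with h1 h2 h3
    · exact Or.inl ⟨rfl, (htf f hf o ho).1, (htf f hf o ho).2⟩
    · exact Or.inr ⟨rfl, (htf o ho f hf).1, (htf o ho f hf).2⟩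
    · exact Or.inr ⟨rfl, (htf o ho f hf).1, (htf o ho f hf).2⟩
    · exact Or.inl ⟨rfl, (htf f hf o ho).1, (htf f hf o ho).2⟩
  -- move to Finset sums
  classical
  rw [← List.sum_toFinset _ (PySem.Set.nodup_ofList gs), ← List.sum_toFinset _ hnd]
  -- restrict both sums to their supports
  have hL : ((PySem.Set.ofList gs).toFinset.filter
        (fun g => (pvTokA g = f ∨ pvTokB g = f) ∧
          ¬(pvTokA g = pvTokB g ∨ (pvTokB g < pvTokA g ∧ (pvTokB g ++ " " ++ pvTokA g) ∈ gs)) ∧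
          pvC gs g ≠ pvC gs (pvTokB g ++ " " ++ pvTokA g))).sum (fun g => pvDelta fr gs g f)
      = (PySem.Set.ofList gs).toFinset.sum (fun g => pvDelta fr gs g f) := by
    apply Finset.sum_filter_of_ne
    intro g hgm hne
    unfold pvDelta at hne
    by_cases h1 : pvTokA g = pvTokB g ∨ (pvTokB g < pvTokA g ∧ (pvTokB g ++ " " ++ pvTokA g) ∈ gs)
    · rw [if_pos h1] at hne; exact absurd rfl hne
    by_cases h2 : pvC gs g = pvC gs (pvTokB g ++ " " ++ pvTokA g)
    · rw [if_neg h1, if_pos h2] at hne; exact absurd rfl hne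
    refine ⟨?_, h1, h2⟩
    by_contra hcf
    push_neg at hcf
    apply hne
    rw [if_neg h1, if_neg h2]
    by_cases h3 : pvC gs g > pvC gs (pvTokB g ++ " " ++ pvTokA g)
    · rw [if_pos h3]
      dsimp only
      rw [if_neg (fun hc : f = pvTokA g => hcf.1 hc.symm),
        if_neg (fun hc : f = pvTokB g ∧ _ => hcf.2 hc.1.symm)]
      split_ifs <;> ring
    · rw [if_neg h3]
      dsimp only
      rw [if_neg (fun hc : f = pvTokB g => hcf.2 hc.symm),
        if_neg (fun hc : f = pvTokA g ∧ _ => hcf.1 hc.1.symm)]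
      split_ifs <;> ring
  have hR : (fr.toFinset.filter
        (fun o => o ≠ f ∧ pvC gs (f ++ " " ++ o) ≠ pvC gs (o ++ " " ++ f))).sum
        (fun o => pvDel fr gs f o)
      = fr.toFinset.sum (fun o => pvDel fr gs f o) := by
    apply Finset.sum_filter_of_ne
    intro o hom hne
    unfold pvDel at hne
    by_contra hc
    rw [if_neg hc] at hne
    exact hne rfl
  rw [← hL, ← hR]
  -- the bijection between processed keys and opposing friends
  apply Finset.sum_nbij' (i := fun g => if pvTokA g = f then pvTokB g else pvTokA g)
    (j := fun o => pvKey gs f o)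
  · -- hi : processed key ↦ opposing friend
    intro g hgm
    rw [Finset.mem_filter, List.mem_toFinset, PySem.Set.mem_ofList] at hgm
    obtain ⟨hgs, htf, hproc, hcne⟩ := hgm
    obtain ⟨x, hx, y, hy, hxy, hge, hta, htb⟩ := hdec g hgs
    rw [Finset.mem_filter, List.mem_toFinset]
    rcases htf with hfa | hfb
    · have hfx : f = x := by rw [← hfa]; exact hta
      subst hfx
      rw [if_pos hta, htb]
      rw [hta, htb] at hcne
      rw [hge] at hcne
      exact ⟨hy, fun he => hxy he.symm, hcne⟩
    · have hfy : f = y := by rw [← hfb]; exact htb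
      subst hfy
      rw [if_neg (by rw [hta]; exact hxy), hta]
      rw [hta, htb] at hcne
      rw [hge] at hcne
      exact ⟨hx, hxy, fun hc => hcne hc.symm⟩
  · -- hj : opposing friend ↦ processed key
    intro o hom
    rw [Finset.mem_filter, List.mem_toFinset] at hom
    obtain ⟨ho, hof, hcne⟩ := hom
    rw [Finset.mem_filter, List.mem_toFinset, PySem.Set.mem_ofList]
    have hmem : pvKey gs f o ∈ gs := by
      unfold pvKey
      split_ifs with h1 h2 h3
      · exact h2
      · apply pvC_pos_mem
        intro hz
        have hz2 : pvC gs (f ++ " " ++ o) = 0 := pvCount_eq_zero_of_not_mem gs _ h2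
        omega
      · exact h3
      · apply pvC_pos_mem
        intro hz
        have hz2 : pvC gs (o ++ " " ++ f) = 0 := pvCount_eq_zero_of_not_mem gs _ h3
        omega
    refine ⟨hmem, ?_⟩
    rcases hkeytok o ho hof with ⟨hke, hta, htb⟩ | ⟨hke, hta, htb⟩
    · refine ⟨Or.inl hta, ?_, ?_⟩
      · rw [hta, htb]
        rintro (he | ⟨hlt, hmem2⟩)
        · exact hof he.symm
        · unfold pvKey at hke
          by_cases h1 : f < o
          · exact absurd (lt_trans h1 hlt) (lt_irrefl f)
          · rw [if_neg h1] at hke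
            by_cases h2 : (o ++ " " ++ f) ∈ gs
            · rw [if_pos h2] at hke
              obtain ⟨he1, he2⟩ := hinj o ho f hf f hf o ho hke
              exact hof he1
            · rw [if_neg h2] at hke
              exact h2 hmem2
      · rw [hta, htb, hke]
        exact hcne
    · refine ⟨Or.inr htb, ?_, ?_⟩
      · rw [hta, htb]
        rintro (he | ⟨hlt, hmem2⟩)
        · exact hof he
        · unfold pvKey at hke
          by_cases h1 : f < o
          · rw [if_pos h1] at hke
            by_cases h2 : (f ++ " " ++ o) ∈ gs
            · rw [if_pos h2] at hke
              obtain ⟨he1, he2⟩ := hinj f hf o ho o ho f hf hke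
              exact hof he1.symm
            · rw [if_neg h2] at hke
              exact h2 hmem2
          · have h1' : o < f := lt_of_le_of_ne (not_lt.mp h1) hof
            exact absurd hlt (not_lt.mpr (le_of_lt h1'))
      · rw [hta, htb, hke]
        omega
  · -- left inverse : j (i g) = g
    intro g hgm
    rw [Finset.mem_filter, List.mem_toFinset, PySem.Set.mem_ofList] at hgm
    obtain ⟨hgs, htf, hproc, hcne⟩ := hgm
    obtain ⟨x, hx, y, hy, hxy, hge, hta, htb⟩ := hdec g hgs
    rcases htf with hfa | hfb
    · have hfx : f = x := by rw [← hfa]; exact hta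
      subst hfx
      rw [if_pos hta, htb]
      unfold pvKey
      by_cases h1 : f < y
      · rw [if_pos h1]
        have hm : (f ++ " " ++ y) ∈ gs := by rw [← hge]; exact hgs
        rw [if_pos hm, hge]
      · rw [hta, htb] at hproc
        have hrev : (y ++ " " ++ f) ∉ gs := fun hc =>
          hproc (Or.inr ⟨lt_of_le_of_ne (not_lt.mp h1) (fun he => hxy he.symm), hc⟩)
        rw [if_neg h1, if_neg hrev, hge]
    · have hfy : f = y := by rw [← hfb]; exact htb
      subst hfy
      rw [if_neg (by rw [hta]; exact hxy), hta]
      unfold pvKey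
      by_cases h1 : f < x
      · rw [if_pos h1]
        rw [hta, htb] at hproc
        have hrev : (f ++ " " ++ x) ∉ gs := fun hc => hproc (Or.inr ⟨h1, hc⟩)
        rw [if_neg hrev, hge]
      · rw [if_neg h1]
        have hm : (x ++ " " ++ f) ∈ gs := by rw [← hge]; exact hgs
        rw [if_pos hm, hge]
  · -- right inverse : i (j o) = o
    intro o hom
    rw [Finset.mem_filter, List.mem_toFinset] at hom
    obtain ⟨ho, hof, hcne⟩ := hom
    rcases hkeytok o ho hof with ⟨hke, hta, htb⟩ | ⟨hke, hta, htb⟩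
    · rw [if_pos hta, htb]
    · rw [if_neg (by rw [hta]; exact hof), hta]
  · -- value equality : pvDelta at the key = pvDel at the opposing friend
    intro g hgm
    rw [Finset.mem_filter, List.mem_toFinset, PySem.Set.mem_ofList] at hgm
    obtain ⟨hgs, htf, hproc, hcne⟩ := hgm
    obtain ⟨x, hx, y, hy, hxy, hge, hta, htb⟩ := hdec g hgs
    rcases htf with hfa | hfb
    · -- f = x ; opposing friend y
      have hfx : f = x := by rw [← hfa]; exact hta
      subst hfx
      subst hge
      rw [if_pos hta, htb]
      have hyf : y ≠ f := fun he => hxy he.symm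
      have hfy' : (f = y) = False := eq_false (fun he => hxy he)
      unfold pvDelta pvDel pvW pvw
      rw [hta, htb] at hproc hcne ⊢
      rw [if_neg hproc, if_neg hcne,
        if_pos (show y ≠ f ∧ pvC gs (f ++ " " ++ y) ≠ pvC gs (y ++ " " ++ f) from ⟨hyf, hcne⟩)]
      by_cases h3 : pvC gs (f ++ " " ++ y) > pvC gs (y ++ " " ++ f)
      · rw [if_pos h3]
        dsimp only
        have hb : (decide (y ≠ f) && decide
            (pvC gs (y ++ " " ++ f) < pvC gs (f ++ " " ++ y) ∨
              (pvC gs (f ++ " " ++ y) = pvC gs (y ++ " " ++ f) ∧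
                pvIdxF fr gs y < pvIdxF fr gs f))) = true := by
          simp only [Bool.and_eq_true, decide_eq_true_eq]
          exact ⟨hyf, Or.inl h3⟩
        rw [hb]
        simp only [hfy', false_and, if_false, if_true]
        split_ifs <;> omega
      · rw [if_neg h3]
        dsimp only
        have hb : (decide (y ≠ f) && decide
            (pvC gs (y ++ " " ++ f) < pvC gs (f ++ " " ++ y) ∨
              (pvC gs (f ++ " " ++ y) = pvC gs (y ++ " " ++ f) ∧
                pvIdxF fr gs y < pvIdxF fr gs f))) = false := by
          simp only [Bool.and_eq_false_iff, decide_eq_false_iff_not]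
          right
          rintro (h | ⟨h, -⟩) <;> omega
        rw [hb]
        simp only [Bool.false_eq_true, if_false, hfy', true_and]
        split_ifs <;> omega
    · -- f = y ; opposing friend x
      have hfy : f = y := by rw [← hfb]; exact htb
      subst hfy
      subst hge
      rw [if_neg (by rw [hta]; exact hxy), hta]
      have hxf : x ≠ f := hxy
      have hfx' : (f = x) = False := eq_false (fun he => hxy he.symm)
      unfold pvDelta pvDel pvW pvw
      rw [hta, htb] at hproc hcne ⊢
      rw [if_neg hproc, if_neg hcne,
        if_pos (show x ≠ f ∧ pvC gs (f ++ " " ++ x) ≠ pvC gs (x ++ " " ++ f) from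
          ⟨hxf, fun hc => hcne hc.symm⟩)]
      by_cases h3 : pvC gs (x ++ " " ++ f) > pvC gs (f ++ " " ++ x)
      · -- winner is x (the opposing friend)
        rw [if_pos h3]
        dsimp only
        have hb : (decide (x ≠ f) && decide
            (pvC gs (x ++ " " ++ f) < pvC gs (f ++ " " ++ x) ∨
              (pvC gs (f ++ " " ++ x) = pvC gs (x ++ " " ++ f) ∧
                pvIdxF fr gs x < pvIdxF fr gs f))) = false := by
          simp only [Bool.and_eq_false_iff, decide_eq_false_iff_not]
          right
          rintro (h | ⟨h, -⟩) <;> omega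
        rw [hb]
        simp only [Bool.false_eq_true, if_false, hfx', true_and]
        split_ifs <;> omega
      · -- winner is f
        rw [if_neg h3]
        dsimp only
        have hb : (decide (x ≠ f) && decide
            (pvC gs (x ++ " " ++ f) < pvC gs (f ++ " " ++ x) ∨
              (pvC gs (f ++ " " ++ x) = pvC gs (x ++ " " ++ f) ∧
                pvIdxF fr gs x < pvIdxF fr gs f))) = true := by
          simp only [Bool.and_eq_true, decide_eq_true_eq]
          exact ⟨hxf, Or.inl (by omega)⟩
        rw [hb]
        simp only [hfx', false_and, if_false, if_true]
        split_ifs <;> omega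

-- ---------- B-side characterisation ----------

lemma pvScore0_items (fr : List String) (v : String → Int) (hnd : fr.Nodup) :
    (fr.foldl (fun (d : PySem.Dict String Int) f => d.insert f (v f)) PySem.Dict.empty).items
      = fr.map (fun f => (f, v f)) := by
  have h := PySem.Dict.items_foldl_insert_fresh fr (fun f => f) (fun f => v f) PySem.Dict.empty
    (fun a _ => PySem.Dict.contains_empty a) (by simpa using hnd)
  simpa using h

lemma pvB_char (fr gs : List String) (hnd : fr.Nodup)
    (htoks : ∀ g ∈ PySem.Set.ofList gs, pvTokA g ∈ fr ∧ pvTokB g ∈ fr)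
    (hKS : ∀ f ∈ fr, ((PySem.Set.ofList gs).map (fun g => pvDelta fr gs g f)).sum
      = (fr.map (fun o => pvDel fr gs f o)).sum) :
    solution_alt fr gs = (PySem.List.max? (fr.map (pvS fr gs)) (fun x => x)).getD 0 := by
  simp only [solution_alt]
  have hfst : (gs.foldl pvGiftStepB (PySem.Dict.empty,
      fr.foldl (fun (d : PySem.Dict String Int) f => d.insert f 0) PySem.Dict.empty)).1
      = PySem.Dict.counter gs := by
    rw [pvGiftsB_fst, PySem.Dict.foldl_insert_getD_add_one_eq_counter]
  have hsnd : (gs.foldl pvGiftStepB (PySem.Dict.empty,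
      fr.foldl (fun (d : PySem.Dict String Int) f => d.insert f 0) PySem.Dict.empty)).2
      = pvIdxD fr gs := by
    rw [pvGiftsB_snd]; rfl
  rw [hfst, hsnd]
  -- the sorted index values
  set vals := PySem.List.sorted (fr.map (fun f => (pvIdxD fr gs).getD f 0)) (fun x => x) with hvals
  have hvperm : vals.Perm (fr.map (fun f => (pvIdxD fr gs).getD f 0)) :=
    PySem.List.sorted_perm _ _ false
  -- the baseline value of each friend
  have hbase : ∀ f ∈ fr, (pvRankFold vals).getD ((pvIdxD fr gs).getD f 0) 0
      = ((fr.map (pvIdxF fr gs)).countP (fun x => decide (x < pvIdxF fr gs f)) : Int) := by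
    intro f hfm
    have hvmem : (pvIdxD fr gs).getD f 0 ∈ vals := by
      rw [hvals, PySem.List.mem_sorted]
      exact List.mem_map.mpr ⟨f, hfm, rfl⟩
    have hidx := pvIdxSorted vals (by
        have := PySem.List.sorted_pairwise (fr.map (fun f => (pvIdxD fr gs).getD f 0)) (fun x => x)
        exact this) _ hvmem
    rw [PySem.Dict.getD_eq_get?_getD, pvRankFold_get?, hidx]
    show ((vals.countP (fun x => decide (x < (pvIdxD fr gs).getD f 0)) : Nat) : Int)
      = ((fr.map (pvIdxF fr gs)).countP (fun x => decide (x < pvIdxF fr gs f)) : Int)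
    congr 1
    rw [hvperm.countP_eq]
    rfl
  -- the final score dict getD
  have hscore : ∀ f ∈ fr,
      ((PySem.Dict.counter gs).keys.foldl
        (pvAdjStep (PySem.Dict.counter gs) (pvIdxD fr gs))
        (fr.foldl (fun (d : PySem.Dict String Int) f =>
          d.insert f ((pvRankFold vals).getD ((pvIdxD fr gs).getD f 0) 0)) PySem.Dict.empty)).getD f 0
      = pvS fr gs f := by
    intro f hfm
    rw [PySem.Dict.keys_counter, pvFoldAdj_getD]
    have hs0 : (fr.foldl (fun (d : PySem.Dict String Int) f =>
        d.insert f ((pvRankFold vals).getD ((pvIdxD fr gs).getD f 0) 0)) PySem.Dict.empty).getD f 0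
        = (pvRankFold vals).getD ((pvIdxD fr gs).getD f 0) 0 := by
      apply PySem.Dict.getD_of_mem_items
      · rw [pvScore0_items fr _ hnd]
        exact List.mem_map.mpr ⟨f, hfm, rfl⟩
      · show (_ : PySem.Dict String Int).keys.Nodup
        have : (fr.foldl (fun (d : PySem.Dict String Int) f =>
            d.insert f ((pvRankFold vals).getD ((pvIdxD fr gs).getD f 0) 0)) PySem.Dict.empty).keys
            = fr := by
          show (_ : PySem.Dict String Int).items.map (·.1) = fr
          rw [pvScore0_items fr _ hnd]
          simp [Function.comp_def]
        rw [this]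
        exact hnd
    rw [hs0, hbase f hfm, hKS f hfm]
    -- now the pointwise identity summed over fr
    unfold pvS
    rw [← PySem.List.sum_map_ite_one_zero (fun o => decide (o ≠ f) && pvW fr gs f o) fr]
    have hcp : ((fr.map (pvIdxF fr gs)).countP (fun x => decide (x < pvIdxF fr gs f)) : Int)
        = (fr.map (fun o => if pvIdxF fr gs o < pvIdxF fr gs f then (1 : Int) else 0)).sum := by
      rw [List.countP_map,
        ← PySem.List.sum_map_ite_one_zero ((fun x => decide (x < pvIdxF fr gs f)) ∘ pvIdxF fr gs) fr]
      apply congrArg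
      apply List.map_congr_left
      intro o _
      by_cases h : pvIdxF fr gs o < pvIdxF fr gs f <;> simp [h]
    rw [hcp, ← PySem.List.sum_map_add_int]
    apply congrArg
    apply List.map_congr_left
    intro o _
    exact (pvPointwise fr gs f o).symm
  -- values of the final dict
  have hkeys0 : (fr.foldl (fun (d : PySem.Dict String Int) f =>
      d.insert f ((pvRankFold vals).getD ((pvIdxD fr gs).getD f 0) 0)) PySem.Dict.empty).keys
      = fr := by
    show (_ : PySem.Dict String Int).items.map (·.1) = fr
    rw [pvScore0_items fr _ hnd]
    simp [Function.comp_def]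
  have hkeysF : ((PySem.Dict.counter gs).keys.foldl
      (pvAdjStep (PySem.Dict.counter gs) (pvIdxD fr gs))
      (fr.foldl (fun (d : PySem.Dict String Int) f =>
        d.insert f ((pvRankFold vals).getD ((pvIdxD fr gs).getD f 0) 0)) PySem.Dict.empty)).keys
      = fr := by
    rw [pvFoldAdj_keys, hkeys0]
    intro g hgm
    rw [PySem.Dict.keys_counter] at hgm
    rw [hkeys0]
    exact htoks g hgm
  have hvalues : ((PySem.Dict.counter gs).keys.foldl
      (pvAdjStep (PySem.Dict.counter gs) (pvIdxD fr gs))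
      (fr.foldl (fun (d : PySem.Dict String Int) f =>
        d.insert f ((pvRankFold vals).getD ((pvIdxD fr gs).getD f 0) 0)) PySem.Dict.empty)).values
      = fr.map (pvS fr gs) := by
    rw [PySem.Dict.values_eq_map_keys _ (by rw [hkeysF]; exact hnd) 0, hkeysF]
    apply List.map_congr_left
    intro f hfm
    exact hscore f hfm
  rw [hvalues]

-- ===== VERDICT helper =====
theorem pvMain (fr gs : List String) (hpre : Pre_solution fr gs) :
    solution fr gs = solution_alt fr gs := by
  obtain ⟨hne, hnd, hnames, hg⟩ := hpre
  rcases hnames with hnil | hname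
  · -- no gifts: the key set is empty and every pvDel guard is false
    subst hnil
    have htoks : ∀ g ∈ PySem.Set.ofList ([] : List String),
        pvTokA g ∈ fr ∧ pvTokB g ∈ fr := by
      intro g hgm
      exact absurd hgm (by simp [PySem.Set.ofList])
    have hKS : ∀ f ∈ fr, ((PySem.Set.ofList ([] : List String)).map
          (fun g => pvDelta fr [] g f)).sum
        = (fr.map (fun o => pvDel fr [] f o)).sum := by
      intro f _
      have hz : ∀ o ∈ fr, pvDel fr [] f o = 0 := by
        intro o _
        unfold pvDel
        rw [if_neg]
        rintro ⟨-, hc⟩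
        exact hc rfl
      rw [List.map_congr_left hz]
      simp [PySem.Set.ofList]
    rw [pvA_char fr [] hnd, pvB_char fr [] hnd htoks hKS]
  · have hname' : ∀ x ∈ fr, x.toList ≠ [] ∧ ∀ c ∈ x.toList, PySem.Chars.isspace c = false := by
      intro x hx
      refine ⟨(hname x hx).1, fun c hc => ?_⟩
      have := (List.all_eq_true.mp (hname x hx).2) c hc
      simpa using this
    have htoks : ∀ g ∈ PySem.Set.ofList gs, pvTokA g ∈ fr ∧ pvTokB g ∈ fr := by
      intro g hgm
      rw [PySem.Set.mem_ofList] at hgm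
      obtain ⟨x, hx, y, hy, hxy, hgl⟩ := hg g hgm
      have hs := pvStrSplitPair x y g (hname' x hx).1 (hname' y hy).1
        (hname' x hx).2 (hname' y hy).2 hgl
      constructor
      · unfold pvTokA; rw [hs]; exact hx
      · unfold pvTokB; rw [hs]; exact hy
    rw [pvA_char fr gs hnd, pvB_char fr gs hnd htoks
      (fun f hfm => pvKeySum fr gs f hnd hname' hg hfm)]

-- ===== VERDICT (by name: the statement is the Claim_ definition above) =====
theorem solution_spec : Claim_equal_solution := by
  unfold Claim_equal_solution
  intro friends gifts hDom hPre
  unfold Spec_solution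
  exact pvMain friends gifts hPre
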